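-- pv_equiv track=rewrite | github.com/Malboro66/IL2_Campaign_Analyzer_v1.0 | app/core/data_processor.py | _extract_names_from_hareport
-- ===== SOURCE A (Python) =====
-- from typing import Dict, Any, List, Optional, Iterable
--
-- def _extract_names_from_hareport(text: str) -> List[str]:
--     if not text:
--         return []
--     lines = [ln.strip() for ln in text.splitlines()]
--     names: List[str] = []
--     collecting = False
--     for ln in lines:
--         if not collecting and ln.lower().startswith("this mission was flown by"):
--             collecting = True
--             continue
--         if collecting:
--             if not ln:
--                 break
--             if any(ch.isdigit() for ch in ln):
--                 continue
--             names.append(ln)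
--     seen = set()
--     uniq = []
--     for n in names:
--         if n not in seen:
--             seen.add(n)
--             uniq.append(n)
--     return uniq
-- ===== SOURCE B (Python) =====
-- from typing import List
--
-- def _after_marker(lines: List[str]) -> List[str]:
--     if not lines:
--         return []
--     if lines[0].lower().startswith("this mission was flown by"):
--         return _names_block(lines[1:])
--     return _after_marker(lines[1:])
--
-- def _names_block(lines: List[str]) -> List[str]:
--     if not lines or not lines[0]:
--         return []
--     rest = _names_block(lines[1:])
--     head = lines[0]
--     if any(ch.isdigit() for ch in head):
--         return rest
--     return [head] + [n for n in rest if n != head]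
--
-- def _extract_names_from_hareport(text: str) -> List[str]:
--     if not text:
--         return []
--     return _after_marker([ln.strip() for ln in text.splitlines()])
-- ===== Notes on version B (the rewrite author's own statement) =====
-- stated objective: alternative
-- what changed: Replaces A's single stateful collecting-flag loop plus a separate seen-set dedup pass by structural recursion on the line list (one helper skips to the marker, a second recurses on the block), with deduplication fused into the result construction: each kept head is prepended and filtered out of the recursively built tail, so no set and no second pass exist.
import Mathlib
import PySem

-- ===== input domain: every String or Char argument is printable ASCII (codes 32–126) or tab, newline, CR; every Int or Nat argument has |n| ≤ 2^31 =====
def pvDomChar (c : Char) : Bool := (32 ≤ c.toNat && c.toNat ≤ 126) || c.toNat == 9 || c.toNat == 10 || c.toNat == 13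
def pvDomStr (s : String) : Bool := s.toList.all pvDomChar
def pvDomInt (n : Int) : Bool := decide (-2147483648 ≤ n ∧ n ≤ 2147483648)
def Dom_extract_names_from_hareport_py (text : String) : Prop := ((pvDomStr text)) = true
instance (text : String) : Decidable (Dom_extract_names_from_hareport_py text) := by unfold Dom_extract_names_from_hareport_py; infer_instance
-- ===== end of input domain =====

-- B replaces A's stateful collecting-flag loop plus seen-set dedup pass by structural
-- recursion on the line list with dedup fused into the result construction (alternative).

-- ===== PORT A =====
-- the 'for ln in lines' loop with its 'collecting' flag, 'continue' and 'break'
def pvALoop : List String → Bool → List String → List String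
  | [], _, names => names
  | ln :: rest, collecting, names =>
    if !collecting && PySem.Str.startswith (PySem.Str.lower ln) "this mission was flown by" then
      pvALoop rest true names
    else if collecting then
      if ln = "" then names
      else if ln.toList.any PySem.Chars.isdigit then pvALoop rest collecting names
      else pvALoop rest collecting (names ++ [ln])
    else pvALoop rest collecting names

-- the manual dedup loop with its 'seen' set
def pvADedup : List String → PySem.Set String → List String → List String
  | [], _, uniq => uniq
  | n :: rest, seen, uniq =>
    if PySem.Set.contains seen n then pvADedup rest seen uniq
    else pvADedup rest (PySem.Set.add seen n) (uniq ++ [n])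

def extract_names_from_hareport_py (text : String) : List String :=
  if text = "" then []
  else
    let lines := (PySem.Str.splitlines text).map PySem.Str.strip
    let names := pvALoop lines false []
    pvADedup names PySem.Set.empty []

-- ===== PORT B =====
-- _names_block: recurse on the block; a kept head is prepended and filtered out of the tail
def pvBBlock : List String → List String
  | [] => []
  | ln :: tail =>
    if ln = "" then []
    else
      let rest := pvBBlock tail
      if ln.toList.any PySem.Chars.isdigit then rest
      else ln :: rest.filter (fun n => n ≠ ln)

-- _after_marker: recurse until the marker line, then hand the tail to _names_block
def pvBAfter : List String → List String
  | [] => []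
  | ln :: tail =>
    if PySem.Str.startswith (PySem.Str.lower ln) "this mission was flown by" then pvBBlock tail
    else pvBAfter tail

def extract_names_from_hareport_py_alt (text : String) : List String :=
  if text = "" then []
  else pvBAfter ((PySem.Str.splitlines text).map PySem.Str.strip)

-- ===== PRECONDITION & SPEC =====
def Spec_extract_names_from_hareport_py (text : String) (out : List String) : Prop := out = extract_names_from_hareport_py_alt text
instance (text : String) (out : List String) : Decidable (Spec_extract_names_from_hareport_py text out) := by unfold Spec_extract_names_from_hareport_py; infer_instance

-- ===== CLAIM (what is proved, stated in full; the proofs are below) =====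
def Claim_equal_extract_names_from_hareport_py : Prop := ∀ (text : String), Dom_extract_names_from_hareport_py text → Spec_extract_names_from_hareport_py text (extract_names_from_hareport_py text)

-- ===== LEMMAS AND PROOFS =====

-- keep-first dedup, fused form (the shape B builds)
def pvBBlockDedup : List String → List String
  | [] => []
  | n :: t => n :: (pvBBlockDedup t).filter (fun m => m ≠ n)

-- dedupFrom l s: what A's dedup loop appends, given seen-set s
def pvDedupFrom : List String → List String → List String
  | [], _ => []
  | n :: t, s => if n ∈ s then pvDedupFrom t s else n :: pvDedupFrom t (s ++ [n])

theorem pvADedup_eq (l : List String) (s u : List String) :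
    pvADedup l s u = u ++ pvDedupFrom l s := by
  induction l generalizing s u with
  | nil => simp [pvADedup, pvDedupFrom]
  | cons n t ih =>
    by_cases h : n ∈ s
    · simp [pvADedup, pvDedupFrom, PySem.Set.contains, h, ih]
    · simp [pvADedup, pvDedupFrom, PySem.Set.contains, PySem.Set.add, h, ih]

theorem pvDedupFrom_congr (l : List String) (s s' : List String)
    (h : ∀ x, x ∈ s ↔ x ∈ s') : pvDedupFrom l s = pvDedupFrom l s' := by
  induction l generalizing s s' with
  | nil => rfl
  | cons n t ih =>
    by_cases hn : n ∈ s
    · simp [pvDedupFrom, hn, (h n).mp hn, ih s s' h]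
    · have hn' : n ∉ s' := fun hx => hn ((h n).mpr hx)
      simp only [pvDedupFrom, hn, hn', if_false]
      rw [ih (s ++ [n]) (s' ++ [n]) (by intro x; simp [h x])]

theorem pvDedupFrom_add (l : List String) (s : List String) (n : String) :
    pvDedupFrom l (s ++ [n]) = (pvDedupFrom l s).filter (fun m => m ≠ n) := by
  induction l generalizing s with
  | nil => rfl
  | cons m t ih =>
    by_cases hm : m ∈ s
    · simp [pvDedupFrom, hm, List.mem_append, ih]
    · by_cases hmn : m = n
      · subst hmn
        have h1 : m ∈ s ++ [m] := by simp
        simp only [pvDedupFrom, if_pos h1, if_neg hm, ih, ne_eq, List.filter_cons,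
          not_true_eq_false, decide_false, Bool.false_eq_true, if_false,
          List.filter_filter, Bool.and_self]
      · have h1 : m ∉ s ++ [n] := by simp [hm, hmn]
        simp only [pvDedupFrom, if_neg h1, if_neg hm, List.filter_cons, ne_eq, hmn,
          not_false_eq_true, decide_true, if_true]
        rw [pvDedupFrom_congr t (s ++ [n] ++ [m]) (s ++ [m] ++ [n]) (by intro x; simp; tauto), ih]

-- fused dedup: first occurrence kept, later duplicates filtered out of the tail
theorem pvDedupFrom_nil_eq (l : List String) :
    pvDedupFrom l [] = pvBBlockDedup l := by
  induction l with
  | nil => rfl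
  | cons n t ih =>
    simp only [pvDedupFrom, List.not_mem_nil, if_false, pvBBlockDedup]
    rw [pvDedupFrom_add, ih]

-- A's collecting phase = takeWhile nonempty + digit filter
theorem pvALoop_collect (lines : List String) (names : List String) :
    pvALoop lines true names =
      names ++ (lines.takeWhile (fun ln => !(ln = ""))).filter
        (fun ln => !(ln.toList.any PySem.Chars.isdigit)) := by
  induction lines generalizing names with
  | nil => simp [pvALoop]
  | cons ln rest ih =>
    by_cases h : ln = ""
    · simp [pvALoop, h]
    · by_cases hd : ln.toList.any PySem.Chars.isdigit
      · simp [pvALoop, h, hd, ih]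
      · simp [pvALoop, h, hd, ih]

-- A's pre-marker phase = dropWhile + drop 1
theorem pvALoop_skip (lines : List String) (names : List String) :
    pvALoop lines false names =
      pvALoop ((lines.dropWhile
        (fun ln => !(PySem.Str.startswith (PySem.Str.lower ln) "this mission was flown by"))).drop 1)
        true names := by
  induction lines with
  | nil => simp [pvALoop]
  | cons ln rest ih =>
    simp only [PySem.Str.startswith_eq, PySem.Str.toList_lower] at ih ⊢
    cases h : PySem.Chars.startswith (PySem.Chars.lower ln.toList)
        ("this mission was flown by".toList) with
    | true =>
      rw [pvALoop]
      simp only [PySem.Str.startswith_eq, PySem.Str.toList_lower, h, List.dropWhile_cons]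
      simp
    | false =>
      rw [pvALoop]
      simp only [PySem.Str.startswith_eq, PySem.Str.toList_lower, h, List.dropWhile_cons]
      simpa using ih

-- B's block recursion = fused dedup of (takeWhile nonempty, digit-filtered)
theorem pvBBlock_eq (lines : List String) :
    pvBBlock lines =
      pvBBlockDedup ((lines.takeWhile (fun ln => !(ln = ""))).filter
        (fun ln => !(ln.toList.any PySem.Chars.isdigit))) := by
  induction lines with
  | nil => rfl
  | cons ln rest ih =>
    by_cases h : ln = ""
    · simp [pvBBlock, h, pvBBlockDedup]
    · by_cases hd : ln.toList.any PySem.Chars.isdigit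
      · simp [pvBBlock, h, hd, ih]
      · simp [pvBBlock, h, hd, ih, pvBBlockDedup]

-- B's marker search = dropWhile + drop 1
theorem pvBAfter_eq (lines : List String) :
    pvBAfter lines =
      pvBBlock ((lines.dropWhile
        (fun ln => !(PySem.Str.startswith (PySem.Str.lower ln) "this mission was flown by"))).drop 1) := by
  induction lines with
  | nil => rfl
  | cons ln rest ih =>
    simp only [PySem.Str.startswith_eq, PySem.Str.toList_lower] at ih ⊢
    cases h : PySem.Chars.startswith (PySem.Chars.lower ln.toList)
        ("this mission was flown by".toList) with
    | true =>
      rw [pvBAfter]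
      simp only [PySem.Str.startswith_eq, PySem.Str.toList_lower, h, List.dropWhile_cons]
      simp
    | false =>
      rw [pvBAfter]
      simp only [PySem.Str.startswith_eq, PySem.Str.toList_lower, h, List.dropWhile_cons]
      simpa using ih

-- ===== VERDICT (by name: the statement is the Claim_ definition above) =====
theorem extract_names_from_hareport_py_spec : Claim_equal_extract_names_from_hareport_py := by
  intro text _
  unfold Spec_extract_names_from_hareport_py
  unfold extract_names_from_hareport_py extract_names_from_hareport_py_alt
  by_cases h : text = ""
  · simp [h]
  · simp only [h, if_false]
    rw [pvALoop_skip, pvALoop_collect, pvBAfter_eq, pvBBlock_eq]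
    simp only [List.nil_append]
    rw [show PySem.Set.empty = ([] : List String) from rfl,
        pvADedup_eq, pvDedupFrom_nil_eq]
    simp
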